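-- pv_equiv track=rewrite | github.com/Lightblues/Leetcode | LC-contest/301-350/334.py | divisibilityArray
-- ===== SOURCE A (Python) =====
-- from typing import List
--
-- def divisibilityArray(word: str, m: int) -> List[int]:
--     n = len(word)
--     ans = [0] * n
--     x = 0
--     for idx,i in enumerate(word):
--         x = x*10 + int(i)
--         x %= m
--         if x==0: ans[idx] = 1
--     return ans
-- ===== SOURCE B (Python) =====
-- from typing import List
--
-- def divisibilityArray(word: str, m: int) -> List[int]:
--     # Recompute each prefix's value from scratch (O(n^2)) instead of
--     # carrying A's running remainder; appends to a result list instead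
--     # of writing into a preallocated one.
--     res = []
--     for i in range(len(word)):
--         v = 0
--         for c in word[:i+1]:
--             v = v*10 + int(c)
--         res.append(1 if v % m == 0 else 0)
--     return res
-- ===== Notes on version B (the rewrite author's own statement) =====
-- stated objective: alternative
-- what changed: B rescans the whole prefix word[:i+1] for every index, rebuilding its integer value from scratch and appending the flag, instead of A's single pass that carries a running remainder and writes into a preallocated [0]*n array.
-- outside the precondition, e.g. on divisibilityArray('', 0): A returns [], B returns []
import Mathlib
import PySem

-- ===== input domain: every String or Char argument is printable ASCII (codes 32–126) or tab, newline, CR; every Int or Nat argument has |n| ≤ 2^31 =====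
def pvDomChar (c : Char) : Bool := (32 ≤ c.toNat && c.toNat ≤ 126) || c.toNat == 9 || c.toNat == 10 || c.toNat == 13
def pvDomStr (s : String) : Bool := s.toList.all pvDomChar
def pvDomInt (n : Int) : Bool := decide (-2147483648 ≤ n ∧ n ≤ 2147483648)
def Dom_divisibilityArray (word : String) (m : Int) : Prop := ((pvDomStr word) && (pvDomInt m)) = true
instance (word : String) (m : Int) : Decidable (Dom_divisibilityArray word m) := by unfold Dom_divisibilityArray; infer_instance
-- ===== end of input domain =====

-- B rescans each prefix from scratch (nested loops) instead of A's single pass with a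
-- running remainder and preallocated array; same values, no speed claim.

-- ===== PORT A =====
-- for idx,i in enumerate(word): x = x*10+int(i); x %= m; if x==0: ans[idx]=1
def divisibilityArray (word : String) (m : Int) : List Int :=
  let n := word.toList.length
  let ans : List Int := List.replicate n 0
  let r := (PySem.List.enumerate word.toList 0).foldl
    (fun (st : Int × List Int) p =>
      let x := st.1 * 10 + (PySem.Int.ofChars? [p.2]).getD 0
      let x := PySem.Int.mod x m
      if x == 0 then (x, st.2.set p.1.toNat 1) else (x, st.2))
    (0, ans)
  r.2

-- ===== PORT B =====
-- for i in range(len(word)): v = 0; for c in word[:i+1]: v = v*10+int(c); res.append(1 if v % m == 0 else 0)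
def divisibilityArray_alt (word : String) (m : Int) : List Int :=
  (PySem.List.pyRange 0 word.toList.length).foldl
    (fun res i =>
      let v := (PySem.List.slice word.toList none (some (i + 1))).foldl
        (fun v c => v * 10 + (PySem.Int.ofChars? [c]).getD 0) 0
      res ++ [if PySem.Int.mod v m == 0 then (1 : Int) else 0])
    []

-- ===== PRECONDITION & SPEC =====
-- Pre_ excludes the inputs where the Python A raises: a non-digit character (ValueError
-- from int(i)) or m = 0 (ZeroDivisionError from x %= m); for word = "" with m = 0 the loop
-- never runs, so A (and B) return [] there although Pre_ excludes it.
def Pre_divisibilityArray (word : String) (m : Int) : Prop :=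
  (word.toList.all Char.isDigit = true) ∧ m ≠ 0
instance (word : String) (m : Int) : Decidable (Pre_divisibilityArray word m) := by
  unfold Pre_divisibilityArray; infer_instance
def pvWitness_divisibilityArray : String × Int := ("21", 7)

def Spec_divisibilityArray (word : String) (m : Int) (out : List Int) : Prop := out = divisibilityArray_alt word m
instance (word : String) (m : Int) (out : List Int) : Decidable (Spec_divisibilityArray word m out) := by unfold Spec_divisibilityArray; infer_instance

-- ===== CLAIM (what is proved, stated in full; the proofs are below) =====
def Claim_equal_divisibilityArray : Prop := ∀ (word : String) (m : Int), Dom_divisibilityArray word m → Pre_divisibilityArray word m → Spec_divisibilityArray word m (divisibilityArray word m)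

-- ===== LEMMAS AND PROOFS =====

-- digit value as both ports compute it
def pvG (c : Char) : Int := (PySem.Int.ofChars? [c]).getD 0

-- value of a digit block continued from seed x (what B's inner loop computes)
def pvVal (x : Int) (cs : List Char) : Int := cs.foldl (fun v c => v * 10 + pvG c) x

-- A's per-step remainder chain and its output list
def pvMarks (m : Int) : List Char → Int → List Int
  | [], _ => []
  | c :: cs, x =>
      (if PySem.Int.mod (x * 10 + pvG c) m == 0 then (1 : Int) else 0)
        :: pvMarks m cs (PySem.Int.mod (x * 10 + pvG c) m)

def pvChain (m : Int) : List Char → Int → Int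
  | [], x => x
  | c :: cs, x => pvChain m cs (PySem.Int.mod (x * 10 + pvG c) m)

theorem pvMod_congr {m a b : Int} (hm : m ≠ 0) (h : m ∣ a - b) :
    PySem.Int.mod a m = PySem.Int.mod b m := by
  have ha := PySem.Int.floordiv_mul_add_mod a m
  have hb := PySem.Int.floordiv_mul_add_mod b m
  have hd : m ∣ (PySem.Int.mod a m - PySem.Int.mod b m) := by
    obtain ⟨k, hk⟩ := h
    exact ⟨k - PySem.Int.floordiv a m + PySem.Int.floordiv b m, by nlinarith [hk]⟩
  have : |PySem.Int.mod a m - PySem.Int.mod b m| < |m| := by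
    rcases lt_trichotomy m 0 with hlt | hz | hgt
    · have b1 := PySem.Int.mod_neg_bounds a hlt
      have b2 := PySem.Int.mod_neg_bounds b hlt
      rw [abs_of_neg hlt]; rw [abs_lt]; omega
    · exact absurd hz hm
    · have := PySem.Int.mod_nonneg a hgt
      have := PySem.Int.mod_lt a hgt
      have := PySem.Int.mod_nonneg b hgt
      have := PySem.Int.mod_lt b hgt
      rw [abs_of_pos hgt]; rw [abs_lt]; omega
  have := Int.eq_zero_of_abs_lt_dvd ((abs_dvd m _).mpr hd) this
  omega

theorem pvVal_congr {m : Int} (cs : List Char) :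
    ∀ {x y : Int}, m ∣ x - y → m ∣ pvVal x cs - pvVal y cs := by
  induction cs with
  | nil => intro x y h; simpa [pvVal] using h
  | cons c cs ih =>
      intro x y h
      have : m ∣ (x * 10 + pvG c) - (y * 10 + pvG c) := by
        obtain ⟨k, hk⟩ := h; exact ⟨k * 10, by linarith⟩
      simpa [pvVal] using ih this

theorem pvMarks_length (m : Int) (cs : List Char) : ∀ x, (pvMarks m cs x).length = cs.length := by
  induction cs with
  | nil => intro x; rfl
  | cons c cs ih => intro x; simp [pvMarks, ih]

theorem pvMarks_getElem {m : Int} (hm : m ≠ 0) (cs : List Char) :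
    ∀ (x : Int) (k : Nat) (hk : k < cs.length),
      (pvMarks m cs x)[k]'(by rw [pvMarks_length]; exact hk)
        = (if PySem.Int.mod (pvVal x (cs.take (k + 1))) m == 0 then (1 : Int) else 0) := by
  induction cs with
  | nil => intro x k hk; simp at hk
  | cons c cs ih =>
      intro x k hk
      match k with
      | 0 => simp [pvMarks, pvVal]
      | k + 1 =>
          have hk' : k < cs.length := by simpa using hk
          have := ih (PySem.Int.mod (x * 10 + pvG c) m) k hk'
          simp only [pvMarks, List.getElem_cons_succ]
          rw [this]
          have hcong : m ∣ PySem.Int.mod (x * 10 + pvG c) m - (x * 10 + pvG c) := by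
            have := PySem.Int.floordiv_mul_add_mod (x * 10 + pvG c) m
            exact ⟨-PySem.Int.floordiv (x * 10 + pvG c) m, by linarith⟩
          have := pvMod_congr hm (pvVal_congr (cs.take (k + 1)) hcong)
          rw [this]
          simp [pvVal, List.take_succ_cons]

-- A's fold, started after a processed prefix P, fills the zero block with pvMarks
theorem foldA_eq (m : Int) (cs : List Char) :
    ∀ (x : Int) (P : List Int),
      (PySem.List.enumerate cs (P.length : Int)).foldl
        (fun (st : Int × List Int) p =>
          let x := st.1 * 10 + (PySem.Int.ofChars? [p.2]).getD 0
          let x := PySem.Int.mod x m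
          if x == 0 then (x, st.2.set p.1.toNat 1) else (x, st.2))
        (x, P ++ List.replicate cs.length 0)
      = (pvChain m cs x, P ++ pvMarks m cs x) := by
  induction cs with
  | nil => intro x P; simp [PySem.List.enumerate, pvChain, pvMarks]
  | cons c cs ih =>
      intro x P
      rw [PySem.List.enumerate_cons, List.foldl_cons]
      have hset : (P ++ List.replicate (c :: cs).length (0 : Int)).set
          ((P.length : Int)).toNat 1 = (P ++ [1]) ++ List.replicate cs.length 0 := by
        rw [Int.toNat_natCast, List.set_append]
        simp [List.replicate_succ]
      have hrepl : P ++ List.replicate (c :: cs).length (0 : Int)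
          = (P ++ [0]) ++ List.replicate cs.length 0 := by
        simp [List.replicate_succ]
      by_cases h : PySem.Int.mod (x * 10 + (PySem.Int.ofChars? [c]).getD 0) m = 0
      · simp only [beq_iff_eq, if_pos h]
        rw [hset]
        have hlen : (((P ++ [(1 : Int)]).length : Nat) : Int) = (P.length : Int) + 1 := by
          simp
        have := ih (PySem.Int.mod (x * 10 + (PySem.Int.ofChars? [c]).getD 0) m) (P ++ [1])
        rw [hlen] at this
        simp only [beq_iff_eq] at this
        rw [this]
        simp [pvChain, pvMarks, pvG, h]
      · simp only [beq_iff_eq, if_neg h]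
        rw [hrepl]
        have hlen : (((P ++ [(0 : Int)]).length : Nat) : Int) = (P.length : Int) + 1 := by
          simp
        have := ih (PySem.Int.mod (x * 10 + (PySem.Int.ofChars? [c]).getD 0) m) (P ++ [0])
        rw [hlen] at this
        simp only [beq_iff_eq] at this
        rw [this]
        simp [pvChain, pvMarks, pvG, h]

theorem A_eq_marks (word : String) (m : Int) :
    divisibilityArray word m = pvMarks m word.toList 0 := by
  have := congrArg Prod.snd (foldA_eq m word.toList 0 [])
  simpa [divisibilityArray] using this

-- generic: appending one element per index is a map
theorem foldl_append_singleton {α β : Type} (f : α → β) :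
    ∀ (l : List α) (init : List β),
      l.foldl (fun res i => res ++ [f i]) init = init ++ l.map f := by
  intro l
  induction l with
  | nil => intro init; simp
  | cons a l ih => intro init; simp [ih]

theorem B_eq_map (word : String) (m : Int) :
    divisibilityArray_alt word m
      = (List.range word.toList.length).map
          (fun k => if PySem.Int.mod (pvVal 0 (word.toList.take (k + 1))) m == 0 then (1 : Int) else 0) := by
  unfold divisibilityArray_alt
  rw [PySem.List.pyRange_zero_natCast, foldl_append_singleton, List.nil_append, List.map_map]
  apply List.map_congr_left
  intro k hk
  simp only [Function.comp]
  have : ((k : Int) + 1) = ((k + 1 : Nat) : Int) := by push_cast; ring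
  rw [this, PySem.List.slice_to_natCast]
  rfl

-- ===== VERDICT (by name: the statement is the Claim_ definition above) =====
theorem divisibilityArray_spec : Claim_equal_divisibilityArray := by
  intro word m _ hpre
  unfold Spec_divisibilityArray
  rcases hpre with ⟨_, hm⟩
  rw [A_eq_marks, B_eq_map]
  apply List.ext_getElem
  · simp [pvMarks_length]
  · intro k h1 h2
    rw [pvMarks_getElem hm word.toList 0 k (by simpa [pvMarks_length] using h1)]
    simp
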